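-- pv_equiv track=rewrite | github.com/acmfi/AdventCode | 2019/day20/skgsergio/queputapereza.py | generate_shitty_graph_p1
-- ===== SOURCE A (Python) =====
-- from typing import List, Dict, Tuple, Set
--
-- def generate_shitty_graph_p1(tiles: Set[Tuple[int, int]], portals: Dict[str, List[Tuple[int, int]]]) -> Dict[Tuple[int, int], List[Tuple[int, int]]]:
--     graph = {}
--
--     for n in tiles:
--         ns = []
--
--         for pn in [(n[0] + 1, n[1]), (n[0], n[1] - 1),
--                    (n[0] - 1, n[1]), (n[0], n[1] + 1)]:
--
--             if pn in tiles:
--                 ns.append(pn)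
--
--         for p in portals.values():
--             if len(p) == 2 and n in p:
--                 ns.append(p[(p.index(n) + 1) % 2])
--
--         graph[n] = ns
--
--     return graph
-- ===== SOURCE B (Python) =====
-- def generate_shitty_graph_p1(tiles, portals):
--     graph = {n: [pn for pn in [(n[0] + 1, n[1]), (n[0], n[1] - 1),
--                                (n[0] - 1, n[1]), (n[0], n[1] + 1)]
--                  if pn in tiles]
--              for n in tiles}
--
--     for p in portals.values():
--         if len(p) == 2:
--             a, b = p
--             if a in graph:
--                 graph[a].append(b)
--             if b in graph and a != b:
--                 graph[b].append(a)
--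
--     return graph
-- ===== Notes on version B (the rewrite author's own statement) =====
-- stated objective: faster
-- what changed: B builds the grid-neighbor adjacency dict in one pass over tiles and then adds portal links in one separate pass over portals.values(), instead of A's per-tile scan of every portal (with list.index) inside the tile loop.
import Mathlib
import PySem

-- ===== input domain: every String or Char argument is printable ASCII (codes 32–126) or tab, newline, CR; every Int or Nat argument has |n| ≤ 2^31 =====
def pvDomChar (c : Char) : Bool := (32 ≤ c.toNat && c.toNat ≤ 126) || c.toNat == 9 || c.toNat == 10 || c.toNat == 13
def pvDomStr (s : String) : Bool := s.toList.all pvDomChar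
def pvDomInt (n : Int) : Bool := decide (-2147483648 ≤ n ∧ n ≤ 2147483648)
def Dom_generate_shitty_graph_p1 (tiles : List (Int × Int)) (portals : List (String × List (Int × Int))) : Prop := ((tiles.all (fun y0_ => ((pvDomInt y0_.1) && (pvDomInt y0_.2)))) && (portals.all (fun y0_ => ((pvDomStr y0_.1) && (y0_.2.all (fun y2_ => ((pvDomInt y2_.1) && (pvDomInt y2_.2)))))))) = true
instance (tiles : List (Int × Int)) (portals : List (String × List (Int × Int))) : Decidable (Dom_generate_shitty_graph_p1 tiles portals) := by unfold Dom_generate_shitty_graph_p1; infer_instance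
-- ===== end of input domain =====

-- B replaces A's per-tile scan over all portals by one separate pass over the portals
-- that appends each portal's two links directly to its endpoints' adjacency lists.

-- ===== PORT A =====
-- literal transliteration of A: for each tile, append in-grid neighbors, then scan
-- every portal value p, appending p[(p.index(n)+1)%2] when len(p)==2 and n in p.
def generate_shitty_graph_p1 (tiles : List (Int × Int)) (portals : List (String × List (Int × Int))) : List (Int × Int × List (Int × Int)) :=
  let graph := tiles.foldl (fun (graph : PySem.Dict (Int × Int) (List (Int × Int))) n =>
    let ns := ([(n.1 + 1, n.2), (n.1, n.2 - 1), (n.1 - 1, n.2), (n.1, n.2 + 1)] : List (Int × Int)).foldl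
      (fun ns pn => if pn ∈ tiles then ns ++ [pn] else ns) []
    let ns := (PySem.Dict.ofList portals).values.foldl
      (fun ns p => if p.length = 2 ∧ n ∈ p then
          -- guard guarantees membership, so .getD defaults are never used
          ns ++ [(PySem.List.pyGet? p (((((PySem.List.index? p n).getD 0) + 1) % 2 : Nat) : Int)).getD (0, 0)]
        else ns) ns
    graph.insert n ns) PySem.Dict.empty
  graph.items.map (fun kv => (kv.1.1, kv.1.2, kv.2))

-- ===== PORT B =====
-- literal transliteration of B: dict comprehension of grid neighbors, then one pass
-- over portals.values() appending b to graph[a] and (if a != b) a to graph[b].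
def generate_shitty_graph_p1_alt (tiles : List (Int × Int)) (portals : List (String × List (Int × Int))) : List (Int × Int × List (Int × Int)) :=
  let graph := tiles.foldl (fun (graph : PySem.Dict (Int × Int) (List (Int × Int))) n =>
    graph.insert n (([(n.1 + 1, n.2), (n.1, n.2 - 1), (n.1 - 1, n.2), (n.1, n.2 + 1)] : List (Int × Int)).filter
      (fun pn => tiles.contains pn))) PySem.Dict.empty
  let graph := (PySem.Dict.ofList portals).values.foldl
    (fun (graph : PySem.Dict (Int × Int) (List (Int × Int))) p =>
      match p with                              -- 'if len(p) == 2: a, b = p'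
      | [a, b] =>
        let graph := if graph.contains a then graph.modify a [] (fun ns => ns ++ [b]) else graph
        if graph.contains b ∧ a ≠ b then graph.modify b [] (fun ns => ns ++ [a]) else graph
      | _ => graph) graph
  graph.items.map (fun kv => (kv.1.1, kv.1.2, kv.2))

-- ===== PRECONDITION & SPEC =====
def Spec_generate_shitty_graph_p1 (tiles : List (Int × Int)) (portals : List (String × List (Int × Int))) (out : List (Int × Int × List (Int × Int))) : Prop := out = generate_shitty_graph_p1_alt tiles portals
instance (tiles : List (Int × Int)) (portals : List (String × List (Int × Int))) (out : List (Int × Int × List (Int × Int))) : Decidable (Spec_generate_shitty_graph_p1 tiles portals out) := by unfold Spec_generate_shitty_graph_p1; infer_instance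

-- ===== CLAIM (what is proved, stated in full; the proofs are below) =====
def Claim_equal_generate_shitty_graph_p1 : Prop := ∀ (tiles : List (Int × Int)) (portals : List (String × List (Int × Int))), Dom_generate_shitty_graph_p1 tiles portals → Spec_generate_shitty_graph_p1 tiles portals (generate_shitty_graph_p1 tiles portals)

-- ===== LEMMAS AND PROOFS =====

-- the single element a portal p contributes to tile n's list (empty if none)
def pvAdd1 (n : Int × Int) (p : List (Int × Int)) : List (Int × Int) :=
  match p with
  | [a, b] => if a = n then [b] else if b = n then [a] else []
  | _ => []

-- A's per-portal append step is exactly "append pvAdd1 n p"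
theorem pvStepA_eq (n : Int × Int) (ns : List (Int × Int)) (p : List (Int × Int)) :
    (if p.length = 2 ∧ n ∈ p then
        ns ++ [(PySem.List.pyGet? p (((((PySem.List.index? p n).getD 0) + 1) % 2 : Nat) : Int)).getD (0, 0)]
      else ns) = ns ++ pvAdd1 n p := by
  match p with
  | [] => simp [pvAdd1]
  | [a] => simp [pvAdd1]
  | a :: b :: c :: t => simp [pvAdd1]
  | [a, b] =>
    by_cases ha : a = n
    · subst ha
      rw [if_pos ⟨rfl, List.mem_cons_self⟩]
      rw [PySem.List.index?_cons_self]
      simp [pvAdd1, PySem.List.pyGet?, PySem.List.pyIdx?]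
    · by_cases hb : b = n
      · subst hb
        rw [if_pos ⟨rfl, by simp⟩]
        rw [PySem.List.index?_cons_of_ne _ ha, PySem.List.index?_cons_self]
        simp [pvAdd1, ha, PySem.List.pyGet?, PySem.List.pyIdx?]
      · rw [if_neg (by simp [Ne.symm ha, Ne.symm hb])]
        simp [pvAdd1, ha, hb]

-- grid-neighbor loop of A equals the filter of B
theorem pvGrid_eq (tiles : List (Int × Int)) (l : List (Int × Int)) (init : List (Int × Int)) :
    l.foldl (fun ns pn => if pn ∈ tiles then ns ++ [pn] else ns) init
      = init ++ l.filter (fun pn => tiles.contains pn) := by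
  induction l generalizing init with
  | nil => simp
  | cons x xs ih =>
    by_cases hx : x ∈ tiles
    · simp [List.filter, hx, ih]
    · simp [List.filter, hx, ih]

-- lookup in a dict built by inserting f n for each n of l
theorem pvGetD_foldl_insert (f : (Int × Int) → List (Int × Int)) (l : List (Int × Int))
    (d : PySem.Dict (Int × Int) (List (Int × Int))) (k : Int × Int) (dflt : List (Int × Int)) :
    (l.foldl (fun g n => g.insert n (f n)) d).getD k dflt
      = if k ∈ l then f k else d.getD k dflt := by
  induction l generalizing d with
  | nil => simp
  | cons x xs ih =>
    simp only [List.foldl_cons, ih, PySem.Dict.getD_insert, List.mem_cons]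
    by_cases hk : k ∈ xs
    · simp [hk]
    · by_cases hx : k = x <;> simp [hk, hx]

-- modify of a present key preserves keys
theorem pvKeysMod (d : PySem.Dict (Int × Int) (List (Int × Int))) (k : Int × Int)
    (d0 : List (Int × Int)) (f : List (Int × Int) → List (Int × Int)) (h : d.contains k = true) :
    (d.modify k d0 f).keys = d.keys := by
  rw [PySem.Dict.keys_modify]
  exact PySem.Dict.keys_insert_of_contains d _ h

-- B's portal step preserves the key list …
theorem pvKeys_stepB (g : PySem.Dict (Int × Int) (List (Int × Int))) (p : List (Int × Int)) :
    ((match p with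
      | [a, b] =>
        let g' := if g.contains a then g.modify a [] (fun ns => ns ++ [b]) else g
        if g'.contains b ∧ a ≠ b then g'.modify b [] (fun ns => ns ++ [a]) else g'
      | _ => g) : PySem.Dict (Int × Int) (List (Int × Int))).keys = g.keys := by
  match p with
  | [] => rfl
  | [a] => rfl
  | a :: b :: c :: t => rfl
  | [a, b] =>
    show (if (if g.contains a then g.modify a [] (fun ns => ns ++ [b]) else g).contains b ∧ a ≠ b
          then (if g.contains a then g.modify a [] (fun ns => ns ++ [b]) else g).modify b [] (fun ns => ns ++ [a])
          else (if g.contains a then g.modify a [] (fun ns => ns ++ [b]) else g)).keys = g.keys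
    set g1 := (if g.contains a then g.modify a [] (fun ns => ns ++ [b]) else g) with hg1
    have hk1 : g1.keys = g.keys := by
      rw [hg1]
      split_ifs with h
      · exact pvKeysMod _ _ _ _ h
      · rfl
    split_ifs with h2
    · rw [pvKeysMod _ _ _ _ h2.1, hk1]
    · exact hk1

-- … and appends exactly pvAdd1 m p to the list of any key m present in g
theorem pvGetD_stepB (g : PySem.Dict (Int × Int) (List (Int × Int))) (p : List (Int × Int))
    (m : Int × Int) (hm : g.contains m = true) :
    ((match p with
      | [a, b] =>
        let g' := if g.contains a then g.modify a [] (fun ns => ns ++ [b]) else g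
        if g'.contains b ∧ a ≠ b then g'.modify b [] (fun ns => ns ++ [a]) else g'
      | _ => g) : PySem.Dict (Int × Int) (List (Int × Int))).getD m []
      = g.getD m [] ++ pvAdd1 m p := by
  match p with
  | [] => simp [pvAdd1]
  | [a] => simp [pvAdd1]
  | a :: b :: c :: t => simp [pvAdd1]
  | [a, b] =>
    show (if (if g.contains a then g.modify a [] (fun ns => ns ++ [b]) else g).contains b ∧ a ≠ b
          then (if g.contains a then g.modify a [] (fun ns => ns ++ [b]) else g).modify b [] (fun ns => ns ++ [a])
          else (if g.contains a then g.modify a [] (fun ns => ns ++ [b]) else g)).getD m []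
        = g.getD m [] ++ pvAdd1 m [a, b]
    set g1 := (if g.contains a then g.modify a [] (fun ns => ns ++ [b]) else g) with hg1
    have hk1 : g1.keys = g.keys := by
      rw [hg1]
      split_ifs with h
      · exact pvKeysMod _ _ _ _ h
      · rfl
    have hc1 : ∀ x, g1.contains x = g.contains x := fun x =>
      Bool.eq_iff_iff.mpr (by rw [PySem.Dict.contains_iff_mem_keys,
        PySem.Dict.contains_iff_mem_keys, hk1])
    by_cases ham : a = m
    · subst ham
      have h1 : g1 = g.modify a [] (fun ns => ns ++ [b]) := by rw [hg1, if_pos hm]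
      have hg1a : g1.getD a [] = g.getD a [] ++ [b] := by rw [h1, PySem.Dict.getD_modify_self]
      split_ifs with h2
      · rw [PySem.Dict.getD_modify_of_ne _ _ _ h2.2, hg1a]
        simp [pvAdd1]
      · rw [hg1a]
        simp [pvAdd1]
    · have hg1m : g1.getD m [] = g.getD m [] := by
        rw [hg1]
        split_ifs with h1
        · exact PySem.Dict.getD_modify_of_ne _ _ _ (fun h => ham h.symm)
        · rfl
      by_cases hbm : b = m
      · subst hbm
        rw [if_pos ⟨by rw [hc1]; exact hm, fun h => ham h⟩,
          PySem.Dict.getD_modify_self, hg1m]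
        simp [pvAdd1, ham]
      · split_ifs with h2
        · rw [PySem.Dict.getD_modify_of_ne _ _ _ (fun h => hbm h.symm), hg1m]
          simp [pvAdd1, ham, hbm]
        · rw [hg1m]
          simp [pvAdd1, ham, hbm]

-- the whole portal pass of B: keys unchanged, each present key's list gains the flatMap
theorem pvFoldB (vals : List (List (Int × Int))) (g : PySem.Dict (Int × Int) (List (Int × Int))) :
    (vals.foldl (fun (graph : PySem.Dict (Int × Int) (List (Int × Int))) p =>
        match p with
        | [a, b] =>
          let graph := if graph.contains a then graph.modify a [] (fun ns => ns ++ [b]) else graph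
          if graph.contains b ∧ a ≠ b then graph.modify b [] (fun ns => ns ++ [a]) else graph
        | _ => graph) g).keys = g.keys
    ∧ ∀ m, g.contains m = true →
      (vals.foldl (fun (graph : PySem.Dict (Int × Int) (List (Int × Int))) p =>
        match p with
        | [a, b] =>
          let graph := if graph.contains a then graph.modify a [] (fun ns => ns ++ [b]) else graph
          if graph.contains b ∧ a ≠ b then graph.modify b [] (fun ns => ns ++ [a]) else graph
        | _ => graph) g).getD m []
        = g.getD m [] ++ vals.flatMap (pvAdd1 m) := by
  induction vals generalizing g with
  | nil => simp
  | cons p rest ih =>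
    have hc : ∀ m, g.contains m = true →
        ((match p with
          | [a, b] =>
            let g' := if g.contains a then g.modify a [] (fun ns => ns ++ [b]) else g
            if g'.contains b ∧ a ≠ b then g'.modify b [] (fun ns => ns ++ [a]) else g'
          | _ => g) : PySem.Dict (Int × Int) (List (Int × Int))).contains m = true := by
      intro m hm
      rw [PySem.Dict.contains_iff_mem_keys] at hm ⊢
      rw [pvKeys_stepB]; exact hm
    constructor
    · rw [List.foldl_cons, (ih _).1, pvKeys_stepB]
    · intro m hm
      rw [List.foldl_cons, (ih _).2 m (hc m hm), pvGetD_stepB g p m hm, List.flatMap_cons,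
        List.append_assoc]

-- ===== VERDICT (by name: the statement is the Claim_ definition above) =====
theorem generate_shitty_graph_p1_spec : Claim_equal_generate_shitty_graph_p1 := by
  intro tiles portals _
  show generate_shitty_graph_p1 tiles portals = generate_shitty_graph_p1_alt tiles portals
  unfold generate_shitty_graph_p1 generate_shitty_graph_p1_alt
  set vals := (PySem.Dict.ofList portals).values with hvals
  set grid := fun n : Int × Int =>
    ([(n.1 + 1, n.2), (n.1, n.2 - 1), (n.1 - 1, n.2), (n.1, n.2 + 1)] : List (Int × Int)).filter
      (fun pn => tiles.contains pn) with hgrid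
  -- A's inner computation as a function of n only
  have hA : ∀ n : Int × Int,
      (let ns := ([(n.1 + 1, n.2), (n.1, n.2 - 1), (n.1 - 1, n.2), (n.1, n.2 + 1)] : List (Int × Int)).foldl
        (fun ns pn => if pn ∈ tiles then ns ++ [pn] else ns) []
      vals.foldl (fun ns p => if p.length = 2 ∧ n ∈ p then
          ns ++ [(PySem.List.pyGet? p (((((PySem.List.index? p n).getD 0) + 1) % 2 : Nat) : Int)).getD (0, 0)]
        else ns) ns) = grid n ++ vals.flatMap (pvAdd1 n) := by
    intro n
    show (vals.foldl (fun ns p => if p.length = 2 ∧ n ∈ p then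
          ns ++ [(PySem.List.pyGet? p (((((PySem.List.index? p n).getD 0) + 1) % 2 : Nat) : Int)).getD (0, 0)]
        else ns) _) = _
    have h1 : ([(n.1 + 1, n.2), (n.1, n.2 - 1), (n.1 - 1, n.2), (n.1, n.2 + 1)] : List (Int × Int)).foldl
        (fun ns pn => if pn ∈ tiles then ns ++ [pn] else ns) [] = grid n := by
      rw [pvGrid_eq]; simp [hgrid]
    rw [h1]
    have h2 : (fun (ns : List (Int × Int)) (p : List (Int × Int)) =>
        if p.length = 2 ∧ n ∈ p then
          ns ++ [(PySem.List.pyGet? p (((((PySem.List.index? p n).getD 0) + 1) % 2 : Nat) : Int)).getD (0, 0)]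
        else ns) = fun ns p => ns ++ pvAdd1 n p := by
      funext ns p; exact pvStepA_eq n ns p
    rw [h2, PySem.List.foldl_append_eq_flatMap]
  -- characterize both dicts through keys + getD
  have hkeysBase : (tiles.foldl (fun (g : PySem.Dict (Int × Int) (List (Int × Int))) n =>
      g.insert n (grid n)) PySem.Dict.empty).keys = PySem.Set.ofList tiles := by
    rw [PySem.Dict.keys_foldl_insert tiles (fun _ n => grid n)]
    simp [PySem.Set.update_nil_left]
  have hkeysA : (tiles.foldl (fun (g : PySem.Dict (Int × Int) (List (Int × Int))) n =>
      g.insert n (grid n ++ vals.flatMap (pvAdd1 n))) PySem.Dict.empty).keys = PySem.Set.ofList tiles := by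
    rw [PySem.Dict.keys_foldl_insert tiles (fun _ n => grid n ++ vals.flatMap (pvAdd1 n))]
    simp [PySem.Set.update_nil_left]
  -- rewrite A's foldl to insert of the closed-form value
  have hAfold : (tiles.foldl (fun (graph : PySem.Dict (Int × Int) (List (Int × Int))) n =>
      let ns := ([(n.1 + 1, n.2), (n.1, n.2 - 1), (n.1 - 1, n.2), (n.1, n.2 + 1)] : List (Int × Int)).foldl
        (fun ns pn => if pn ∈ tiles then ns ++ [pn] else ns) []
      let ns := vals.foldl (fun ns p => if p.length = 2 ∧ n ∈ p then
          ns ++ [(PySem.List.pyGet? p (((((PySem.List.index? p n).getD 0) + 1) % 2 : Nat) : Int)).getD (0, 0)]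
        else ns) ns
      graph.insert n ns) PySem.Dict.empty)
      = tiles.foldl (fun (g : PySem.Dict (Int × Int) (List (Int × Int))) n =>
        g.insert n (grid n ++ vals.flatMap (pvAdd1 n))) PySem.Dict.empty := by
    congr 1
    funext g n
    exact congrArg (fun v => g.insert n v) (hA n)
  rw [hAfold]
  -- both items lists
  set base := tiles.foldl (fun (g : PySem.Dict (Int × Int) (List (Int × Int))) n =>
    g.insert n (grid n)) PySem.Dict.empty with hbase
  have hBfold := pvFoldB vals base
  set dB := vals.foldl (fun (graph : PySem.Dict (Int × Int) (List (Int × Int))) p =>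
      match p with
      | [a, b] =>
        let graph := if graph.contains a then graph.modify a [] (fun ns => ns ++ [b]) else graph
        if graph.contains b ∧ a ≠ b then graph.modify b [] (fun ns => ns ++ [a]) else graph
      | _ => graph) base with hdB
  have hkeysB : dB.keys = PySem.Set.ofList tiles := by rw [hdB, hBfold.1, hkeysBase]
  have hnodup : (PySem.Set.ofList tiles).Nodup := PySem.Set.nodup_ofList tiles
  have hitems : (tiles.foldl (fun (g : PySem.Dict (Int × Int) (List (Int × Int))) n =>
      g.insert n (grid n ++ vals.flatMap (pvAdd1 n))) PySem.Dict.empty).items = dB.items := by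
    rw [PySem.Dict.items_eq_map_keys _ (by rw [hkeysA]; exact hnodup) [],
      PySem.Dict.items_eq_map_keys dB (by rw [hkeysB]; exact hnodup) [],
      hkeysA, hkeysB]
    apply List.map_congr_left
    intro k hk
    have hkt : k ∈ tiles := (PySem.Set.mem_ofList tiles k).1 hk
    have hbc : base.contains k = true := by
      rw [PySem.Dict.contains_iff_mem_keys, hkeysBase]; exact hk
    have hvA : (tiles.foldl (fun (g : PySem.Dict (Int × Int) (List (Int × Int))) n =>
        g.insert n (grid n ++ vals.flatMap (pvAdd1 n))) PySem.Dict.empty).getD k []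
        = grid k ++ vals.flatMap (pvAdd1 k) := by
      rw [pvGetD_foldl_insert, if_pos hkt]
    have hvB : dB.getD k [] = grid k ++ vals.flatMap (pvAdd1 k) := by
      rw [hdB, hBfold.2 k hbc, hbase, pvGetD_foldl_insert, if_pos hkt]
    rw [hvA, hvB]
  exact congrArg (List.map fun kv => (kv.1.1, kv.1.2, kv.2)) hitems
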